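-- pv_equiv track=rewrite | github.com/wocn-unicamp/TraceFL-Net-Sim | leaf-sync/models/metrics/writer.py | get_metrics_names
-- ===== SOURCE A (Python) =====
-- def get_metrics_names(metrics, metrics_name=None):
--     """Devuelve el orden de las métricas. Para sys, forzamos orden estable."""
--     if len(metrics) == 0:
--         return []
--
--     # keys del primer cliente
--     metrics_dict = next(iter(metrics.values()))
--     keys = list(metrics_dict.keys())
--
--     # Solo para el archivo sys: orden estable (evita cambios/doble columnas)
--     if metrics_name is not None and metrics_name.endswith('_sys'):
--         preferred = ['bytes_written', 'bytes_read', 'local_computations', 'computingTime']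
--         ordered = [k for k in preferred if k in keys]
--         rest = [k for k in keys if k not in ordered]
--         return ordered + rest
--
--     return keys
-- ===== SOURCE B (Python) =====
-- def get_metrics_names(metrics, metrics_name=None):
--     """Devuelve el orden de las métricas. Para sys, forzamos orden estable."""
--     for metrics_dict in metrics.values():
--         keys = list(metrics_dict.keys())
--         break
--     else:
--         return []
--
--     if not (metrics_name or '').endswith('_sys'):
--         return keys
--
--     preferred = ['bytes_written', 'bytes_read', 'local_computations', 'computingTime']
--     # bucket (counting-sort) pass: each key goes into the bucket of its priority,
--     # keys outside `preferred` into the last bucket, preserving their order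
--     buckets = [[] for _ in range(len(preferred) + 1)]
--     for k in keys:
--         i = preferred.index(k) if k in preferred else len(preferred)
--         buckets[i].append(k)
--     return [k for b in buckets for k in b]
-- ===== Notes on version B (the rewrite author's own statement) =====
-- stated objective: alternative
-- what changed: The _sys branch's two filter passes over preferred and keys plus concatenation are replaced by a single bucket (counting-sort) pass over keys: each key is appended to the bucket of its priority (non-preferred keys to a last bucket), and the buckets are concatenated.
import Mathlib
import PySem

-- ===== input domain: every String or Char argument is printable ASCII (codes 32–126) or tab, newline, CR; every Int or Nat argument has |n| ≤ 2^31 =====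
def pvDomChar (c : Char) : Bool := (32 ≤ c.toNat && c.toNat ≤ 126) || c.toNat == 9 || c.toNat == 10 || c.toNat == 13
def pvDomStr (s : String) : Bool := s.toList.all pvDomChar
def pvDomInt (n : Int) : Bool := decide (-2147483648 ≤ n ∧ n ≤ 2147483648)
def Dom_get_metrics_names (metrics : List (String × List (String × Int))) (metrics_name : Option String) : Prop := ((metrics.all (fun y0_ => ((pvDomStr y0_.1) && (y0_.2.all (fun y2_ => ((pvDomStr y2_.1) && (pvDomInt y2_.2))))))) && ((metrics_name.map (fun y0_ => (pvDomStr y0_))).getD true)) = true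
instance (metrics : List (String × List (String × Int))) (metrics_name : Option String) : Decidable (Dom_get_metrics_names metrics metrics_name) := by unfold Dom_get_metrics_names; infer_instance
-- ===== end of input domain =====

-- B replaces the _sys branch's two filter passes + concatenation by one bucket (counting-sort) pass over the keys (objective: alternative).

-- ===== PORT A =====
def pvPreferred : List String := ["bytes_written", "bytes_read", "local_computations", "computingTime"]

def get_metrics_names (metrics : List (String × List (String × Int))) (metrics_name : Option String) : List String :=
  match (PySem.Dict.ofList metrics).values with
  | [] => []
  | mdict :: _ =>
    let keys := (PySem.Dict.ofList mdict).keys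
    if (match metrics_name with | some s => PySem.Str.endswith s "_sys" | none => false) then
      let ordered := pvPreferred.filter (fun k => keys.contains k)
      let rest := keys.filter (fun k => !(ordered.contains k))
      ordered ++ rest
    else keys

-- ===== PORT B =====
-- i = preferred.index(k) if k in preferred else len(preferred)
def pvIdx (k : String) : Nat :=
  if pvPreferred.contains k then (PySem.List.index? pvPreferred k).getD 0 else pvPreferred.length

-- buckets[i].append(k): the five buckets kept as a 5-tuple
def pvBucketStep (b : List String × List String × List String × List String × List String)
    (k : String) : List String × List String × List String × List String × List String :=
  match pvIdx k with
  | 0 => (b.1 ++ [k], b.2.1, b.2.2.1, b.2.2.2.1, b.2.2.2.2)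
  | 1 => (b.1, b.2.1 ++ [k], b.2.2.1, b.2.2.2.1, b.2.2.2.2)
  | 2 => (b.1, b.2.1, b.2.2.1 ++ [k], b.2.2.2.1, b.2.2.2.2)
  | 3 => (b.1, b.2.1, b.2.2.1, b.2.2.2.1 ++ [k], b.2.2.2.2)
  | _ => (b.1, b.2.1, b.2.2.1, b.2.2.2.1, b.2.2.2.2 ++ [k])

def get_metrics_names_alt (metrics : List (String × List (String × Int))) (metrics_name : Option String) : List String :=
  match ((PySem.Dict.ofList metrics).values).head? with
  | none => []
  | some mdict =>
    let keys := (PySem.Dict.ofList mdict).keys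
    if !(PySem.Str.endswith (metrics_name.getD "") "_sys") then keys
    else
      let bs := keys.foldl pvBucketStep ([], [], [], [], [])
      bs.1 ++ bs.2.1 ++ bs.2.2.1 ++ bs.2.2.2.1 ++ bs.2.2.2.2

-- ===== PRECONDITION & SPEC =====
def Spec_get_metrics_names (metrics : List (String × List (String × Int))) (metrics_name : Option String) (out : List String) : Prop := out = get_metrics_names_alt metrics metrics_name
instance (metrics : List (String × List (String × Int))) (metrics_name : Option String) (out : List String) : Decidable (Spec_get_metrics_names metrics metrics_name out) := by unfold Spec_get_metrics_names; infer_instance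

-- ===== CLAIM (what is proved, stated in full; the proofs are below) =====
def Claim_equal_get_metrics_names : Prop := ∀ (metrics : List (String × List (String × Int))) (metrics_name : Option String), Dom_get_metrics_names metrics metrics_name → Spec_get_metrics_names metrics metrics_name (get_metrics_names metrics metrics_name)

-- ===== LEMMAS AND PROOFS =====

lemma pvIdx_eq (k : String) :
    pvIdx k = if k = "bytes_written" then 0 else if k = "bytes_read" then 1
      else if k = "local_computations" then 2 else if k = "computingTime" then 3 else 4 := by
  by_cases c0 : k = "bytes_written"
  · subst c0; decide
  · by_cases c1 : k = "bytes_read"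
    · subst c1; decide
    · by_cases c2 : k = "local_computations"
      · subst c2; decide
      · by_cases c3 : k = "computingTime"
        · subst c3; decide
        · simp only [c0, c1, c2, c3, if_false]
          have hc : pvPreferred.contains k = false := by
            simp only [pvPreferred, List.contains_eq_mem, List.mem_cons,
              List.not_mem_nil, or_false, decide_eq_false_iff_not]
            push Not
            exact ⟨c0, c1, c2, c3⟩
          unfold pvIdx
          rw [hc]
          simp [pvPreferred]

lemma pvFoldl_buckets (keys : List String) (a0 a1 a2 a3 a4 : List String) :
    keys.foldl pvBucketStep (a0, a1, a2, a3, a4)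
      = (a0 ++ keys.filter (fun y => pvIdx y == 0),
         a1 ++ keys.filter (fun y => pvIdx y == 1),
         a2 ++ keys.filter (fun y => pvIdx y == 2),
         a3 ++ keys.filter (fun y => pvIdx y == 3),
         a4 ++ keys.filter (fun y => pvIdx y == 4)) := by
  induction keys generalizing a0 a1 a2 a3 a4 with
  | nil => simp
  | cons k t ih =>
    have h := pvIdx_eq k
    simp only [List.foldl_cons, List.filter_cons]
    by_cases c0 : k = "bytes_written"
    · have hv : pvIdx k = 0 := by rw [h]; simp [c0]
      simp [pvBucketStep, hv, ih, List.append_assoc]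
    · by_cases c1 : k = "bytes_read"
      · have hv : pvIdx k = 1 := by rw [h]; simp [c1]
        simp [pvBucketStep, hv, ih, List.append_assoc]
      · by_cases c2 : k = "local_computations"
        · have hv : pvIdx k = 2 := by rw [h]; simp [c2]
          simp [pvBucketStep, hv, ih, List.append_assoc]
        · by_cases c3 : k = "computingTime"
          · have hv : pvIdx k = 3 := by rw [h]; simp [c3]
            simp [pvBucketStep, hv, ih, List.append_assoc]
          · have hv : pvIdx k = 4 := by rw [h]; simp [c0, c1, c2, c3]
            simp [pvBucketStep, hv, ih, List.append_assoc]

lemma pvFilter_beq_of_nodup (l : List String) (hn : l.Nodup) (a : String) :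
    l.filter (fun y => y == a) = if a ∈ l then [a] else [] := by
  have : l.filter (fun y => y == a) = l.filter (fun y => decide (y = a)) := by
    apply List.filter_congr; intro x _; rw [Bool.eq_iff_iff]; simp
  rw [this, List.filter_eq]
  by_cases h : a ∈ l
  · rw [List.count_eq_one_of_mem hn h]; simp [h]
  · rw [List.count_eq_zero_of_not_mem h]; simp [h]

lemma pvSys_branch (keys : List String) (hn : keys.Nodup) :
    (keys.foldl pvBucketStep ([], [], [], [], [])).1
      ++ (keys.foldl pvBucketStep ([], [], [], [], [])).2.1
      ++ (keys.foldl pvBucketStep ([], [], [], [], [])).2.2.1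
      ++ (keys.foldl pvBucketStep ([], [], [], [], [])).2.2.2.1
      ++ (keys.foldl pvBucketStep ([], [], [], [], [])).2.2.2.2
      = pvPreferred.filter (fun k => keys.contains k)
        ++ keys.filter (fun k => !((pvPreferred.filter (fun k' => keys.contains k')).contains k)) := by
  rw [pvFoldl_buckets]
  have h0 : keys.filter (fun y => pvIdx y == 0) = keys.filter (fun y => y == "bytes_written") := by
    apply List.filter_congr; intro x _
    rw [pvIdx_eq x]; split_ifs with c1 c2 c3 c4 <;> simp_all
  have h1 : keys.filter (fun y => pvIdx y == 1) = keys.filter (fun y => y == "bytes_read") := by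
    apply List.filter_congr; intro x _
    rw [pvIdx_eq x]; split_ifs with c1 c2 c3 c4 <;> simp_all
  have h2 : keys.filter (fun y => pvIdx y == 2) = keys.filter (fun y => y == "local_computations") := by
    apply List.filter_congr; intro x _
    rw [pvIdx_eq x]; split_ifs with c1 c2 c3 c4 <;> simp_all
  have h3 : keys.filter (fun y => pvIdx y == 3) = keys.filter (fun y => y == "computingTime") := by
    apply List.filter_congr; intro x _
    rw [pvIdx_eq x]; split_ifs with c1 c2 c3 c4 <;> simp_all
  have h4 : keys.filter (fun y => pvIdx y == 4)
      = keys.filter (fun k => !((pvPreferred.filter (fun k' => keys.contains k')).contains k)) := by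
    apply List.filter_congr; intro x hx
    rw [pvIdx_eq x]
    simp only [pvPreferred]
    split_ifs with c1 c2 c3 c4 <;> simp_all [List.mem_filter]
  simp only [List.nil_append, h0, h1, h2, h3, h4]
  rw [pvFilter_beq_of_nodup keys hn, pvFilter_beq_of_nodup keys hn,
      pvFilter_beq_of_nodup keys hn, pvFilter_beq_of_nodup keys hn]
  simp only [pvPreferred, List.filter_cons, List.filter_nil]
  by_cases m0 : "bytes_written" ∈ keys <;> by_cases m1 : "bytes_read" ∈ keys <;>
    by_cases m2 : "local_computations" ∈ keys <;> by_cases m3 : "computingTime" ∈ keys <;>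
    simp [m0, m1, m2, m3]

lemma pvBranch_cond (metrics_name : Option String) :
    (match metrics_name with | some s => PySem.Str.endswith s "_sys" | none => false)
      = PySem.Str.endswith (metrics_name.getD "") "_sys" := by
  cases metrics_name with
  | none => decide
  | some s => rfl

-- ===== VERDICT (by name: the statement is the Claim_ definition above) =====
theorem get_metrics_names_spec : Claim_equal_get_metrics_names := by
  intro metrics metrics_name _
  unfold Spec_get_metrics_names get_metrics_names get_metrics_names_alt
  cases hv : (PySem.Dict.ofList metrics).values with
  | nil => rfl
  | cons mdict rest =>
    simp only [List.head?_cons]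
    rw [pvBranch_cond]
    cases hb : PySem.Str.endswith (metrics_name.getD "") "_sys" with
    | false => simp
    | true =>
      simp only [if_true, Bool.not_true, Bool.false_eq_true, if_false]
      exact (pvSys_branch _ (PySem.Dict.nodup_keys_ofList mdict)).symm
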